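-- pv_equiv track=rewrite | github.com/trackIT-Systems/tsflash | tsflash/usb.py | find_first_usb_hub
-- ===== SOURCE A (Python) =====
-- def find_first_usb_hub(ports_data):
--     """
--     Find the first USB hub in the ports data.
--
--     A hub is identified by having child ports (ports starting with its name + ".")
--
--     Args:
--         ports_data: Dictionary mapping port strings to device info
--
--     Returns:
--         str: Port string of the first hub found, or None if no hub found
--     """
--     # Sort ports to get consistent ordering
--     sorted_ports = sorted(ports_data.keys())
--
--     for port_str in sorted_ports:
--         # Check if this port has children (indicating it's a hub)
--         port_prefix = port_str + "."
--         has_children = any(p.startswith(port_prefix) for p in ports_data.keys())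
--
--         if has_children:
--             return port_str
--
--     return None
-- ===== SOURCE B (Python) =====
-- def find_first_usb_hub(ports_data):
--     """One pass over the keys: collect every existing ancestor prefix (split at '.')
--     as a hub, then return the lexicographically smallest hub (None if there is none)."""
--     keys = set(ports_data)
--     hubs = set()
--     for k in keys:
--         for i, c in enumerate(k):
--             if c == "." and k[:i] in keys:
--                 hubs.add(k[:i])
--     return min(hubs) if hubs else None
-- ===== Notes on version B (the rewrite author's own statement) =====
-- stated objective: faster
-- what changed: Instead of scanning all keys for a child of every key in sorted order (quadratic in the number of keys), B builds the key set once, marks for each key those of its dot-separated ancestor prefixes that exist as keys as hubs, and returns the minimum hub; no sort and no nested key-by-key scan.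
import Mathlib
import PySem

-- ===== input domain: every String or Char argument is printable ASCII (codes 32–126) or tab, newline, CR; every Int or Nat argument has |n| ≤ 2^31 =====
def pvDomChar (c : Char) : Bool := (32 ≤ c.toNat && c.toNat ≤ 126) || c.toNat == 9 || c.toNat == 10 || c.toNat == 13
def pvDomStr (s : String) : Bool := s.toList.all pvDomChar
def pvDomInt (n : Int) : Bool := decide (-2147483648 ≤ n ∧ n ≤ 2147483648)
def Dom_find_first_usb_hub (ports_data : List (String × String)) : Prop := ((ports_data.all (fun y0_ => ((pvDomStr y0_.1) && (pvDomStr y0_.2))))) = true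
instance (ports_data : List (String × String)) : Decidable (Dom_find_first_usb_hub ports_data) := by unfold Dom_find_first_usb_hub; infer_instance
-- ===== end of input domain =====

-- B replaces A's sorted quadratic child-scan by one pass that marks each key's existing
-- dot-separated ancestor prefixes as hubs and returns the minimum hub (objective: faster).


-- ===== PORT A =====
-- 'port_str + "."' and startswith are ported on List Char (Python str concat = append of code points, exact).
def find_first_usb_hub (ports_data : List (String × String)) : Option String :=
  let sorted_ports := PySem.List.sorted (PySem.Dict.ofList ports_data).keys id
  List.find?
    (fun port_str =>
      (PySem.Dict.ofList ports_data).keys.any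
        (fun p => PySem.Chars.startswith p.toList (port_str.toList ++ ['.'])))
    sorted_ports

-- ===== PORT B =====
-- 'k[:i]' is PySem.List.slice k.toList none (some i) (exact); min over the hub set is PySem.List.min?.
def find_first_usb_hub_alt (ports_data : List (String × String)) : Option String :=
  let keys : PySem.Set String := PySem.Set.ofList (ports_data.map Prod.fst)
  let hubs : PySem.Set String :=
    List.foldl
      (fun hubs k =>
        List.foldl
          (fun hubs ic =>
            if ic.2 == '.' &&
                PySem.Set.contains keys (String.ofList (PySem.List.slice k.toList none (some ic.1))) then
              PySem.Set.add hubs (String.ofList (PySem.List.slice k.toList none (some ic.1)))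
            else hubs)
          hubs (PySem.List.enumerate k.toList))
      PySem.Set.empty keys
  if hubs.isEmpty then none else PySem.List.min? hubs id

-- ===== PRECONDITION & SPEC =====
def Spec_find_first_usb_hub (ports_data : List (String × String)) (out : Option String) : Prop := out = find_first_usb_hub_alt ports_data
instance (ports_data : List (String × String)) (out : Option String) : Decidable (Spec_find_first_usb_hub ports_data out) := by unfold Spec_find_first_usb_hub; infer_instance

-- ===== CLAIM (what is proved, stated in full; the proofs are below) =====
def Claim_equal_find_first_usb_hub : Prop := ∀ (ports_data : List (String × String)), Dom_find_first_usb_hub ports_data → Spec_find_first_usb_hub ports_data (find_first_usb_hub ports_data)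

-- ===== LEMMAS AND PROOFS =====

-- y is a hub w.r.t. the key list ks: some key extends y by "." and more.
def pvIsHub (ks : List String) (y : String) : Prop :=
  ∃ k ∈ ks, (y.toList ++ ['.']) <+: k.toList

lemma pv_mem_keys_update (d : PySem.Dict String String) (l : List (String × String)) (y : String) :
    y ∈ (d.update l).keys ↔ y ∈ d.keys ∨ y ∈ l.map Prod.fst := by
  induction l generalizing d with
  | nil => simp [PySem.Dict.update]
  | cons p t ih =>
    simp only [PySem.Dict.update, List.foldl_cons] at *
    rw [ih]
    simp [PySem.Dict.mem_keys_insert]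
    tauto

lemma pv_mem_keys_ofList (l : List (String × String)) (y : String) :
    y ∈ (PySem.Dict.ofList l).keys ↔ y ∈ l.map Prod.fst := by
  simp [PySem.Dict.ofList, pv_mem_keys_update, PySem.Dict.keys_empty]

lemma pv_mem_foldl_add_if {β : Type} (l : List β) (c : β → Bool) (f : β → String)
    (s : PySem.Set String) (y : String) :
    y ∈ l.foldl (fun s b => if c b then s.add (f b) else s) s ↔
      y ∈ s ∨ ∃ b ∈ l, c b = true ∧ y = f b := by
  induction l generalizing s with
  | nil => simp
  | cons a t ih =>
    simp only [List.foldl_cons]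
    by_cases h : c a = true
    · rw [if_pos h, ih]
      constructor
      · rintro (hy | ⟨b, hb, hc, rfl⟩)
        · rcases (PySem.Set.mem_add _ _ _).1 hy with hy | rfl
          · exact Or.inl hy
          · exact Or.inr ⟨a, List.mem_cons_self, h, rfl⟩
        · exact Or.inr ⟨b, List.mem_cons_of_mem _ hb, hc, rfl⟩
      · rintro (hy | ⟨b, hb, hc, rfl⟩)
        · exact Or.inl ((PySem.Set.mem_add _ _ _).2 (Or.inl hy))
        · rcases List.mem_cons.1 hb with rfl | hb
          · exact Or.inl ((PySem.Set.mem_add _ _ _).2 (Or.inr rfl))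
          · exact Or.inr ⟨b, hb, hc, rfl⟩
    · rw [if_neg h, ih]
      constructor
      · rintro (hy | ⟨b, hb, hc, rfl⟩)
        · exact Or.inl hy
        · exact Or.inr ⟨b, List.mem_cons_of_mem _ hb, hc, rfl⟩
      · rintro (hy | ⟨b, hb, hc, rfl⟩)
        · exact Or.inl hy
        · rcases List.mem_cons.1 hb with rfl | hb
          · exact absurd hc h
          · exact Or.inr ⟨b, hb, hc, rfl⟩

lemma pv_mem_foldl_of_step {β : Type} (l : List β) (g : PySem.Set String → β → PySem.Set String)
    (Q : β → String → Prop) (h : ∀ s b y, y ∈ g s b ↔ y ∈ s ∨ Q b y) (s : PySem.Set String)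
    (y : String) : y ∈ l.foldl g s ↔ y ∈ s ∨ ∃ b ∈ l, Q b y := by
  induction l generalizing s with
  | nil => simp
  | cons a t ih =>
    simp only [List.foldl_cons]
    rw [ih, h]
    simp
    tauto

lemma pv_hub_prefix_iff (y k : String) :
    (y.toList ++ ['.']) <+: k.toList ↔
      ∃ j : ℕ, j < k.toList.length ∧ k.toList[j]? = some '.' ∧ y.toList = k.toList.take j := by
  constructor
  · rintro ⟨t, ht⟩
    refine ⟨y.toList.length, ?_, ?_, ?_⟩
    · rw [← ht]; simp
    · rw [← ht]; simp
    · rw [← ht]; simp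
  · rintro ⟨j, hj, hget, htake⟩
    have : y.toList ++ ['.'] = k.toList.take (j + 1) := by
      rw [List.take_add_one, ← htake, hget]
      simp
    rw [this]
    exact List.take_prefix _ _

lemma pv_find?_sorted_min {p : String → Bool} {l : List String}
    (hs : l.Pairwise (fun a b : String => a ≤ b)) {m : String}
    (h : List.find? p l = some m) :
    m ∈ l ∧ p m = true ∧ ∀ y ∈ l, p y = true → m ≤ y := by
  induction l with
  | nil => simp at h
  | cons a t ih =>
    rcases List.pairwise_cons.1 hs with ⟨ha, ht⟩
    rw [List.find?_cons] at h
    by_cases hpa : p a = true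
    · simp only [hpa] at h
      cases h
      refine ⟨List.mem_cons_self, hpa, ?_⟩
      intro y hy _
      rcases List.mem_cons.1 hy with rfl | hy
      · exact le_refl _
      · exact ha y hy
    · rw [Bool.not_eq_true] at hpa
      simp only [hpa] at h
      rcases ih ht h with ⟨hm, hpm, hmin⟩
      refine ⟨List.mem_cons_of_mem _ hm, hpm, ?_⟩
      intro y hy hpy
      rcases List.mem_cons.1 hy with rfl | hy
      · rw [hpa] at hpy; exact absurd hpy (by simp)
      · exact hmin y hy hpy

-- B's hub set holds exactly the keys that are hubs.
lemma pv_hubs_char (KB : PySem.Set String) (y : String) :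
    (y ∈ List.foldl
      (fun hubs k =>
        List.foldl
          (fun hubs ic =>
            if ic.2 == '.' &&
                PySem.Set.contains KB (String.ofList (PySem.List.slice k.toList none (some ic.1))) then
              PySem.Set.add hubs (String.ofList (PySem.List.slice k.toList none (some ic.1)))
            else hubs)
          hubs (PySem.List.enumerate k.toList))
      PySem.Set.empty KB) ↔ (y ∈ (KB : List String) ∧ pvIsHub KB y) := by
  rw [pv_mem_foldl_of_step (KB : List String) _
    (fun k y => ∃ ic ∈ PySem.List.enumerate k.toList,
      (ic.2 == '.' &&
        PySem.Set.contains KB (String.ofList (PySem.List.slice k.toList none (some ic.1)))) = true ∧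
      y = String.ofList (PySem.List.slice k.toList none (some ic.1)))
    (fun s k y => pv_mem_foldl_add_if _ _ _ _ _)]
  simp only [PySem.Set.empty_eq, List.not_mem_nil, false_or]
  unfold pvIsHub
  constructor
  · rintro ⟨k, hk, ic, hic, hcond, rfl⟩
    rw [PySem.List.enumerate_eq_zipIdx_map] at hic
    rcases List.mem_map.1 hic with ⟨⟨c, j⟩, hmem, heq⟩
    have hj : (c, j) ∈ k.toList.zipIdx := hmem
    rw [List.mk_mem_zipIdx_iff_getElem?] at hj
    cases heq
    simp only [Bool.and_eq_true, beq_iff_eq] at hcond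
    have hsl : PySem.List.slice k.toList none (some ((0 : ℤ) + (j : ℤ))) = k.toList.take j := by
      rw [zero_add, PySem.List.slice_to _ (by positivity)]
      simp
    rcases hcond with ⟨hc, hcont⟩
    rw [PySem.Set.contains_iff] at hcont
    rw [hsl] at hcont ⊢
    refine ⟨hcont, k, hk, ?_⟩
    rw [pv_hub_prefix_iff]
    refine ⟨j, ?_, ?_, ?_⟩
    · exact (List.getElem?_eq_some_iff.1 hj).1
    · rw [hj, hc]
    · simp
  · rintro ⟨hyKB, k, hk, hpre⟩
    rcases (pv_hub_prefix_iff y k).1 hpre with ⟨j, hj, hget, htake⟩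
    refine ⟨k, hk, ((0 : ℤ) + (j : ℤ), '.'), ?_, ?_, ?_⟩
    · rw [PySem.List.enumerate_eq_zipIdx_map]
      exact List.mem_map.2 ⟨('.', j), List.mk_mem_zipIdx_iff_getElem?.2 hget, rfl⟩
    · have hsl : PySem.List.slice k.toList none (some ((0 : ℤ) + (j : ℤ))) = k.toList.take j := by
        rw [zero_add, PySem.List.slice_to _ (by positivity)]
        simp
      simp only [hsl, Bool.and_eq_true, beq_iff_eq]
      refine ⟨by simp, ?_⟩
      rw [PySem.Set.contains_iff, ← htake, String.ofList_toList]
      exact hyKB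
    · have hsl : PySem.List.slice k.toList none (some ((0 : ℤ) + (j : ℤ))) = k.toList.take j := by
        rw [zero_add, PySem.List.slice_to _ (by positivity)]
        simp
      rw [hsl, ← htake, String.ofList_toList]

-- A's 'any' test decides pvIsHub.
lemma pv_any_iff (ks : List String) (y : String) :
    (ks.any (fun p => PySem.Chars.startswith p.toList (y.toList ++ ['.']))) = true ↔ pvIsHub ks y := by
  rw [List.any_eq_true]
  unfold pvIsHub
  constructor
  · rintro ⟨k, hk, hsw⟩
    exact ⟨k, hk, (PySem.Chars.startswith_iff _ _).1 hsw⟩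
  · rintro ⟨k, hk, hpre⟩
    exact ⟨k, hk, (PySem.Chars.startswith_iff _ _).2 hpre⟩

lemma pv_main (l : List (String × String)) :
    find_first_usb_hub l = find_first_usb_hub_alt l := by
  unfold find_first_usb_hub find_first_usb_hub_alt
  simp only []
  set K := (PySem.Dict.ofList l).keys with hK
  set KB : PySem.Set String := PySem.Set.ofList (l.map Prod.fst) with hKB
  have memiff : ∀ y, y ∈ K ↔ y ∈ (KB : List String) := by
    intro y
    rw [pv_mem_keys_ofList, PySem.Set.mem_ofList]
  have hubiff : ∀ y, pvIsHub K y ↔ pvIsHub KB y := by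
    intro y
    unfold pvIsHub
    constructor
    · rintro ⟨k, hk, h⟩; exact ⟨k, (memiff k).1 hk, h⟩
    · rintro ⟨k, hk, h⟩; exact ⟨k, (memiff k).2 hk, h⟩
  set hubs : PySem.Set String := List.foldl _ PySem.Set.empty (KB : List String) with hhubs
  have hchar : ∀ y, y ∈ (hubs : List String) ↔ y ∈ (KB : List String) ∧ pvIsHub KB y :=
    fun y => pv_hubs_char KB y
  set p : String → Bool :=
    fun port_str => K.any (fun q => PySem.Chars.startswith q.toList (port_str.toList ++ ['.'])) with hp
  have hpiff : ∀ y, p y = true ↔ pvIsHub K y := fun y => pv_any_iff K y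
  cases hfind : List.find? p (PySem.List.sorted K id) with
  | none =>
    have hno : ∀ y ∈ K, ¬ pvIsHub K y := by
      intro y hy hhub
      exact (List.find?_eq_none.1 hfind y
        ((PySem.List.sorted_perm K id false).mem_iff.2 hy)) ((hpiff y).2 hhub)
    have hempty : (hubs : List String) = [] := by
      rw [List.eq_nil_iff_forall_not_mem]
      intro y hy
      rcases (hchar y).1 hy with ⟨hyK, hyhub⟩
      exact hno y ((memiff y).2 hyK) ((hubiff y).2 hyhub)
    rw [if_pos (by simp [hempty])]
  | some m =>
    rcases pv_find?_sorted_min (PySem.List.sorted_pairwise K id) hfind with ⟨hmem, hpm, hmin⟩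
    have hmK : m ∈ K := (PySem.List.sorted_perm K id false).mem_iff.1 hmem
    have hmhubs : m ∈ (hubs : List String) :=
      (hchar m).2 ⟨(memiff m).1 hmK, (hubiff m).1 ((hpiff m).1 hpm)⟩
    have hne : (hubs : List String) ≠ [] := by
      intro h; rw [h] at hmhubs; exact List.not_mem_nil hmhubs
    rw [if_neg (by simp [List.isEmpty_iff, hne])]
    cases hmn : PySem.List.min? (hubs : List String) (id : String → String) with
    | none => exact absurd ((PySem.List.min?_eq_none_iff _ _).1 hmn) hne
    | some m' =>
      have hm'mem : m' ∈ (hubs : List String) := PySem.List.min?_mem hmn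
      rcases (hchar m').1 hm'mem with ⟨hm'KB, hm'hub⟩
      have hm'K : m' ∈ K := (memiff m').2 hm'KB
      have h1 : m ≤ m' :=
        hmin m' ((PySem.List.sorted_perm K id false).mem_iff.2 hm'K)
          ((hpiff m').2 ((hubiff m').2 hm'hub))
      have h2 : m' ≤ m := PySem.List.min?_isMin hmn m hmhubs
      exact congrArg some (le_antisymm h1 h2)

-- ===== VERDICT (by name: the statement is the Claim_ definition above) =====
theorem find_first_usb_hub_spec : Claim_equal_find_first_usb_hub := by
  intro l _
  unfold Spec_find_first_usb_hub
  exact pv_main l
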